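-- pv_equiv track=rewrite | github.com/obedasare0-dot/unifiedapp | app/services/planogram_psa_reader.py | merge_long_text_fields
-- ===== SOURCE A (Python) =====
-- def merge_long_text_fields(fields: list[str]) -> list[str]:
--     """Merge consecutive long-text fields (documentation, notes, JSON).
--
--     Long-text fields are identified as fields containing >100 characters
--     or starting with special markers like { or <.
--     """
--     if not fields:
--         return fields
--
--     merged = []
--     i = 0
--
--     while i < len(fields):
--         field = fields[i]
--
--         # Check if this is a long-text field
--         is_long_text = (
--             len(field) > 100 or
--             field.strip().startswith(('{', '<', '<?xml'))
--         )
--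
--         if is_long_text:
--             # Merge with next fields if they're also long or part of the same block
--             merged_field = field
--             j = i + 1
--
--             while j < len(fields):
--                 next_field = fields[j]
--                 # Stop if we hit a "normal" field
--                 if len(next_field) < 50 and not next_field.strip().startswith(('{', '<')):
--                     break
--                 merged_field += " " + next_field
--                 j += 1
--
--             merged.append(merged_field)
--             i = j
--         else:
--             merged.append(field)
--             i += 1
--
--     return merged
-- ===== SOURCE B (Python) =====
-- def merge_long_text_fields(fields: list[str]) -> list[str]:
--     """Merge consecutive long-text fields (documentation, notes, JSON).
--
--     Flat single-pass state machine: `current` holds the open long-text block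
--     (None when no block is open).  A field failing the continuation rule
--     (len >= 50 or stripped text starting with '{'/'<') also fails the start
--     rule (len > 100 or those markers), so after closing a block the field is
--     appended directly.
--     """
--     merged = []
--     current = None
--     for field in fields:
--         if current is not None:
--             if len(field) >= 50 or field.strip().startswith(('{', '<')):
--                 current += " " + field
--                 continue
--             merged.append(current)
--             current = None
--         if len(field) > 100 or field.strip().startswith(('{', '<')):
--             current = field
--         else:
--             merged.append(field)
--     if current is not None:
--         merged.append(current)
--     return merged
-- ===== Notes on version B (the rewrite author's own statement) =====
-- stated objective: simpler
-- what changed: Replaces the index-based outer while with a nested inner merging while by one flat for-loop state machine carrying the open block in an accumulator variable, flushed when a normal field or the end of input is reached.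
import Mathlib
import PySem

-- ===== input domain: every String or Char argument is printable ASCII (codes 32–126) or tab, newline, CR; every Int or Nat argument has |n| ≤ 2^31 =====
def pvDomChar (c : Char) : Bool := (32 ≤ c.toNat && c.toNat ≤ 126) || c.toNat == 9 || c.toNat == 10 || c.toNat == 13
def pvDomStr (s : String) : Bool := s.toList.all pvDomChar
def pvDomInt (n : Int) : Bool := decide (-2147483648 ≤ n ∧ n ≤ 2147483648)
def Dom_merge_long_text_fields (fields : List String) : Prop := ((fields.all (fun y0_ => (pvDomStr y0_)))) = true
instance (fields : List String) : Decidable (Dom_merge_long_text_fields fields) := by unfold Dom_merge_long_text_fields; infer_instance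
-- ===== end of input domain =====

-- B replaces A's index-based outer while with nested merging while by one flat
-- single-pass state machine carrying the open block in an accumulator (objective: simpler).

-- ===== PORT A =====
-- field.strip().startswith(('{', '<', '<?xml'))
def aStartMark (f : String) : Bool :=
  PySem.Str.startswith (PySem.Str.strip f) "{" ||
  PySem.Str.startswith (PySem.Str.strip f) "<" ||
  PySem.Str.startswith (PySem.Str.strip f) "<?xml"

-- next_field.strip().startswith(('{', '<'))
def contMark (f : String) : Bool :=
  PySem.Str.startswith (PySem.Str.strip f) "{" ||
  PySem.Str.startswith (PySem.Str.strip f) "<"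

-- inner while: merge following fields into merged_field until a "normal" field breaks
def aInner (mergedField : String) (rest : List String) : String × List String :=
  match rest with
  | [] => (mergedField, [])
  | nf :: rs =>
    if PySem.Str.len nf < 50 && !(contMark nf) then (mergedField, nf :: rs)
    else aInner (mergedField ++ " " ++ nf) rs

theorem aInner_rest_length_le (m : String) (rest : List String) :
    (aInner m rest).2.length ≤ rest.length := by
  induction rest generalizing m with
  | nil => simp [aInner]
  | cons nf rs ih =>
    simp only [aInner]
    split
    · simp
    · exact le_trans (ih _) (Nat.le_succ _)

-- outer while over the suffix of fields starting at i
def aOuter (fields : List String) : List String :=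
  match fields with
  | [] => []
  | f :: rest =>
    if decide (100 < PySem.Str.len f) || aStartMark f then
      let p := aInner f rest
      p.1 :: aOuter p.2
    else
      f :: aOuter rest
termination_by fields.length
decreasing_by
  · have := aInner_rest_length_le f rest; simp; omega
  · simp

def merge_long_text_fields (fields : List String) : List String :=
  if fields.isEmpty then fields else aOuter fields

-- ===== PORT B =====
-- continuation rule: len(field) >= 50 or field.strip().startswith(('{', '<'))
def bCont (f : String) : Bool := decide (50 ≤ PySem.Str.len f) || contMark f

-- start rule: len(field) > 100 or field.strip().startswith(('{', '<'))
def bStart (f : String) : Bool := decide (100 < PySem.Str.len f) || contMark f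

-- one step of the for-loop; state = (merged so far, open block or none)
def bStep (st : List String × Option String) (f : String) : List String × Option String :=
  match st with
  | (merged, some cur) =>
    if bCont f then (merged, some (cur ++ " " ++ f))
    else if bStart f then (merged ++ [cur], some f)
    else (merged ++ [cur, f], none)
  | (merged, none) =>
    if bStart f then (merged, some f) else (merged ++ [f], none)

def merge_long_text_fields_alt (fields : List String) : List String :=
  match fields.foldl bStep ([], none) with
  | (merged, some cur) => merged ++ [cur]
  | (merged, none) => merged

-- ===== PRECONDITION & SPEC =====
def Spec_merge_long_text_fields (fields : List String) (out : List String) : Prop := out = merge_long_text_fields_alt fields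
instance (fields : List String) (out : List String) : Decidable (Spec_merge_long_text_fields fields out) := by unfold Spec_merge_long_text_fields; infer_instance

-- ===== CLAIM (what is proved, stated in full; the proofs are below) =====
def Claim_equal_merge_long_text_fields : Prop := ∀ (fields : List String), Dom_merge_long_text_fields fields → Spec_merge_long_text_fields fields (merge_long_text_fields fields)

-- ===== LEMMAS AND PROOFS =====

-- helper for B's final flush
def bFlush (st : List String × Option String) : List String :=
  match st with
  | (merged, some cur) => merged ++ [cur]
  | (merged, none) => merged

theorem alt_eq_flush (fields : List String) :
    merge_long_text_fields_alt fields = bFlush (fields.foldl bStep ([], none)) := by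
  simp only [merge_long_text_fields_alt, bFlush]

-- '<?xml' starts with '<', so A's start marker equals B's two-marker test
theorem aStartMark_eq_contMark (f : String) : aStartMark f = contMark f := by
  simp only [aStartMark, contMark]
  cases h1 : PySem.Str.startswith (PySem.Str.strip f) "{" <;>
  cases h2 : PySem.Str.startswith (PySem.Str.strip f) "<" <;>
  cases h3 : PySem.Str.startswith (PySem.Str.strip f) "<?xml" <;> simp_all
  -- remaining: "<?xml" is prefix but "<" is not: contradiction
  rw [PySem.Chars.startswith_iff] at h3
  have h2' : PySem.Chars.startswith (PySem.Chars.strip f.toList) ['<'] = true := by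
    rw [PySem.Chars.startswith_iff]
    exact List.IsPrefix.trans ⟨['?', 'x', 'm', 'l'], rfl⟩ h3
  simp [h2'] at h2

-- a field failing the continuation rule also fails the start rule
theorem not_bStart_of_not_bCont (f : String) (h : bCont f = false) : bStart f = false := by
  simp only [bCont, bStart, PySem.Str.len_eq] at *
  rcases Bool.or_eq_false_iff.mp h with ⟨h1, h2⟩
  rw [Bool.or_eq_false_iff]
  refine ⟨by simp_all; omega, h2⟩

-- core invariant, both loop states at once, by structural induction on the suffix
theorem core (l : List String) :
    (∀ acc, bFlush (l.foldl bStep (acc, none)) = acc ++ aOuter l) ∧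
    (∀ acc cur, bFlush (l.foldl bStep (acc, some cur)) = acc ++ ((aInner cur l).1 :: aOuter (aInner cur l).2)) := by
  induction l with
  | nil => simp [bFlush, aOuter, aInner]
  | cons f rs ih =>
    constructor
    · intro acc
      rw [aOuter]
      simp only [List.foldl_cons, bStep]
      rw [aStartMark_eq_contMark]
      by_cases hs : bStart f = true
      · rw [if_pos hs]
        simp only [bStart] at hs
        rw [if_pos hs, ih.2]
      · rw [if_neg hs]
        simp only [bStart] at hs
        rw [if_neg hs, ih.1]
        simp
    · intro acc cur
      simp only [List.foldl_cons, bStep, aInner]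
      by_cases hc : bCont f = true
      · rw [if_pos hc]
        have : ¬ (PySem.Str.len f < 50 && !(contMark f)) = true := by
          simp only [bCont, PySem.Str.len_eq] at hc
          cases hm : contMark f <;> simp_all
        rw [if_neg this, ih.2]
      · have hc' : bCont f = false := by simp_all
        have hs := not_bStart_of_not_bCont f hc'
        rw [if_neg hc, if_neg (by simp [hs])]
        have hb : (PySem.Str.len f < 50 && !(contMark f)) = true := by
          simp only [bCont] at hc'; simp_all
        rw [if_pos hb]
        rw [aOuter]
        rw [aStartMark_eq_contMark]
        simp only [bStart] at hs
        rw [if_neg (by simp only [hs]; exact Bool.false_ne_true)]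
        rw [ih.1]
        simp

-- ===== VERDICT (by name: the statement is the Claim_ definition above) =====
theorem merge_long_text_fields_spec : Claim_equal_merge_long_text_fields := by
  intro fields _
  unfold Spec_merge_long_text_fields
  rw [alt_eq_flush, (core fields).1 []]
  cases fields with
  | nil => simp [merge_long_text_fields, aOuter]
  | cons f rs => simp [merge_long_text_fields]
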